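-- pv_equiv track=rewrite | github.com/ismardn/pychatbot-pinto_ribeiro-radouane-a | traitement_fichiers.py | en_minuscule
-- ===== SOURCE A (Python) =====
-- def en_minuscule(chaine):
--     """
--     Convertit tous les caractères majuscules d'une chaîne en minuscules.
--
--     :param chaine: La chaîne à convertir.
--     :return: Une nouvelle chaîne avec tous les caractères en minuscules.
--     """
--     nouvelle_chaine = ""
--
--     for caractere in chaine:
--         if ord("A") <= ord(caractere) <= ord('Z'):
--             nouvelle_chaine += chr(ord(caractere) + ord("a") - ord("A"))
--         else:
--             nouvelle_chaine += caractere
--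
--     return nouvelle_chaine
-- ===== SOURCE B (Python) =====
-- def en_minuscule(chaine):
--     table = {c: c + 32 for c in range(ord("A"), ord("Z") + 1)}
--     return chaine.translate(table)
-- ===== Notes on version B (the rewrite author's own statement) =====
-- stated objective: faster
-- what changed: B precomputes an ASCII A-Z translation table once and does a single str.translate pass instead of a per-character range check with string concatenation in a Python loop.
import Mathlib
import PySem

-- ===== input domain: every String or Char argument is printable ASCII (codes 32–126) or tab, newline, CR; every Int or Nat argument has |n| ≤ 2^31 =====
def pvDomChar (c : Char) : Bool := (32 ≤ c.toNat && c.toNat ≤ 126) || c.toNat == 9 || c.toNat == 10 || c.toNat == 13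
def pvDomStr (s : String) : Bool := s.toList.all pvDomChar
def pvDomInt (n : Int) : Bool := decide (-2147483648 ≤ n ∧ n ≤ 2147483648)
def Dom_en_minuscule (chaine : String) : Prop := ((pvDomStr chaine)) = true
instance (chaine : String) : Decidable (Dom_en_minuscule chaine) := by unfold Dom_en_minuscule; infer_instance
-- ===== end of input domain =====

-- B builds an A–Z translation table once and translates in one pass (idiomatic).
-- ===== PORT A =====
def en_minuscule (chaine : String) : String :=
  chaine.toList.foldl
    (fun nouvelle_chaine caractere =>
      if 65 ≤ caractere.toNat ∧ caractere.toNat ≤ 90 then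
        nouvelle_chaine ++ String.ofList [Char.ofNat (caractere.toNat + 32)]
      else
        nouvelle_chaine ++ String.ofList [caractere]) ""

-- ===== PORT B =====
def pvTable : PySem.Dict Int Int :=
  (PySem.List.pyRange 65 91 1).foldl (fun d c => d.insert c (c + 32)) PySem.Dict.empty

def en_minuscule_alt (chaine : String) : String :=
  String.ofList (chaine.toList.map (fun ch =>
    Char.ofNat (pvTable.getD (ch.toNat : Int) (ch.toNat : Int)).toNat))

-- ===== PRECONDITION & SPEC =====
def Spec_en_minuscule (chaine : String) (out : String) : Prop := out = en_minuscule_alt chaine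
instance (chaine : String) (out : String) : Decidable (Spec_en_minuscule chaine out) := by unfold Spec_en_minuscule; infer_instance

-- ===== CLAIM (what is proved, stated in full; the proofs are below) =====
def Claim_equal_en_minuscule : Prop := ∀ (chaine : String), Dom_en_minuscule chaine → Spec_en_minuscule chaine (en_minuscule chaine)

-- ===== LEMMAS AND PROOFS =====
def pvFA (c : Char) : Char :=
  if 65 ≤ c.toNat ∧ c.toNat ≤ 90 then Char.ofNat (c.toNat + 32) else c

theorem pv_foldA (l acc : List Char) :
    l.foldl (fun nouvelle_chaine caractere =>
      if 65 ≤ caractere.toNat ∧ caractere.toNat ≤ 90 then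
        nouvelle_chaine ++ String.ofList [Char.ofNat (caractere.toNat + 32)]
      else
        nouvelle_chaine ++ String.ofList [caractere]) (String.ofList acc)
    = String.ofList (acc ++ l.map pvFA) := by
  induction l generalizing acc with
  | nil => simp
  | cons c t ih =>
    simp only [List.foldl_cons, List.map_cons]
    by_cases h : 65 ≤ c.toNat ∧ c.toNat ≤ 90
    · rw [if_pos h]
      have : String.ofList acc ++ String.ofList [Char.ofNat (c.toNat + 32)]
          = String.ofList (acc ++ [Char.ofNat (c.toNat + 32)]) :=
        String.ofList_append.symm
      rw [this, ih]
      simp [pvFA, h]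
    · rw [if_neg h]
      have : String.ofList acc ++ String.ofList [c] = String.ofList (acc ++ [c]) := String.ofList_append.symm
      rw [this, ih]
      simp [pvFA, h]

theorem pv_table_getD (n : Nat) (h : n ≤ 126) :
    pvTable.getD (n : Int) (n : Int)
      = if 65 ≤ n ∧ n ≤ 90 then ((n : Int) + 32) else (n : Int) := by
  interval_cases n <;> decide

theorem pv_char_eq (c : Char) (h : pvDomChar c = true) :
    pvFA c = Char.ofNat (pvTable.getD (c.toNat : Int) (c.toNat : Int)).toNat := by
  have hle : c.toNat ≤ 126 := by
    simp [pvDomChar] at h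
    omega
  rw [pv_table_getD c.toNat hle]
  unfold pvFA
  by_cases hc : 65 ≤ c.toNat ∧ c.toNat ≤ 90
  · rw [if_pos hc, if_pos hc]
    have : ((c.toNat : Int) + 32).toNat = c.toNat + 32 := by omega
    rw [this]
  · rw [if_neg hc, if_neg hc]
    have : ((c.toNat : Int)).toNat = c.toNat := by omega
    rw [this, Char.ofNat_toNat]

-- ===== VERDICT (by name: the statement is the Claim_ definition above) =====
theorem en_minuscule_spec : Claim_equal_en_minuscule := by
  intro chaine hdom
  unfold Spec_en_minuscule en_minuscule en_minuscule_alt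
  have h0 : ("" : String) = String.ofList [] := rfl
  rw [h0, pv_foldA]
  simp only [List.nil_append]
  congr 1
  apply List.map_congr_left
  intro c hc
  have : pvDomChar c = true := by
    have := hdom
    unfold Dom_en_minuscule pvDomStr at this
    exact List.all_eq_true.mp this c hc
  exact pv_char_eq c this
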